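-- pv_equiv track=rewrite | github.com/BarnabyAlexandraBaron/ESXI_CONTROL | Controller/net_info_collector.py | extract_transition_segments
-- ===== SOURCE A (Python) =====
-- def extract_transition_segments(path, region_map, dest_ip):
--     # 建立 node → 区域名 映射
--     node_to_region = {}
--     for region, nodes in region_map.items():
--         for node in nodes:
--             node_to_region[node] = region
--
--     segments = []
--     current_region = node_to_region.get(path[0], "未知区域")
--     segment_start_idx = 0
--
--     for i in range(1, len(path)):
--         node = path[i]
--         region = node_to_region.get(node, "未知区域")
--
--         if region != current_region:
--             # 从 segment_start_idx 到 i 的段为一个“跨区域段”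
--             segment = path[segment_start_idx:i + 1]
--             segments.append(segment)
--             segment_start_idx = i
--             current_region = region
--
--     # 最后一段添加目标主机 IP
--     last_segment = path[segment_start_idx:]
--     if last_segment:
--         last_segment = last_segment + [dest_ip]
--         segments.append(last_segment)
--
--     return segments
-- ===== SOURCE B (Python) =====
-- def extract_transition_segments(path, region_map, dest_ip):
--     node_to_region = {node: region for region, nodes in region_map.items() for node in nodes}
--     region = lambda n: node_to_region.get(n, "未知区域")
--
--     segments = []
--     current = [path[0]]
--     for prev, cur in zip(path, path[1:]):
--         current.append(cur)
--         if region(cur) != region(prev):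
--             segments.append(current)
--             current = [cur]
--     segments.append(current + [dest_ip])
--     return segments
-- ===== Notes on version B (the rewrite author's own statement) =====
-- stated objective: simpler
-- what changed: Replaces A's index-based range loop with slice bookkeeping (segment_start_idx, current_region, path[start:i+1]) by a single structural pass over zip(path, path[1:]) that grows the current segment list directly and compares each node's region with its predecessor's, with no indices or slices and an unconditional final append.
import Mathlib
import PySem

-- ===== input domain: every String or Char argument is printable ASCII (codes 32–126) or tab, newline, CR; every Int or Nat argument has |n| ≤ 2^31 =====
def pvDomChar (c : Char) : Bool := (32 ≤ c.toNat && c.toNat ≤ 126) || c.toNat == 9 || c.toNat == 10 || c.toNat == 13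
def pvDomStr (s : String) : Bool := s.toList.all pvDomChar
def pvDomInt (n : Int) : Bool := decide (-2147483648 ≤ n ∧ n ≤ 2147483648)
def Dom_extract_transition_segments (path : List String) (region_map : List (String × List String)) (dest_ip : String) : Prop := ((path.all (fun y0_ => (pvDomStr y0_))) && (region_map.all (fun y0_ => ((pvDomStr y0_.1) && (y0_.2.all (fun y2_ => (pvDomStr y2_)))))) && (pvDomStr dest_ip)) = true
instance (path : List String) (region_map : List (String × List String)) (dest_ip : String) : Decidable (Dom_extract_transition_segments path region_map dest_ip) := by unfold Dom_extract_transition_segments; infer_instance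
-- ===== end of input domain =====

-- B replaces A's index/slice bookkeeping with one structural pass over zip(path, path[1:]): same cost, plainer decomposition.


-- ===== PORT A =====
def extract_transition_segments (path : List String) (region_map : List (String × List String)) (dest_ip : String) : List (List String) :=
  -- node_to_region = {}; for region, nodes in region_map.items(): for node in nodes: node_to_region[node] = region
  let node_to_region : PySem.Dict String String :=
    region_map.foldl (fun d rn => rn.2.foldl (fun d node => d.insert node rn.1) d) PySem.Dict.empty
  -- current_region = node_to_region.get(path[0], "未知区域"); path[0] raises on empty path → Pre_ requires path ≠ []
  let st := (PySem.List.pyRange 1 (path.length : Int) 1).foldl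
    (fun (st : List (List String) × String × Int) i =>
      let node := PySem.List.pyGetD path i ""
      let region := node_to_region.getD node "未知区域"
      if region ≠ st.2.1 then
        (st.1 ++ [PySem.List.slice path (some st.2.2) (some (i + 1))], region, i)
      else st)
    ([], node_to_region.getD (PySem.List.pyGetD path 0 "") "未知区域", 0)
  let last_segment := PySem.List.slice path (some st.2.2) none
  if last_segment ≠ [] then st.1 ++ [last_segment ++ [dest_ip]] else st.1

-- ===== PORT B =====
def extract_transition_segments_alt (path : List String) (region_map : List (String × List String)) (dest_ip : String) : List (List String) :=
  let node_to_region : PySem.Dict String String :=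
    region_map.foldl (fun d rn => rn.2.foldl (fun d node => d.insert node rn.1) d) PySem.Dict.empty
  let region := fun n => node_to_region.getD n "未知区域"
  -- current = [path[0]] raises on empty path → Pre_ requires path ≠ []
  let st := (path.zip (PySem.List.slice path (some 1) none)).foldl
    (fun (st : List (List String) × List String) pr =>
      let current := st.2 ++ [pr.2]
      if region pr.2 ≠ region pr.1 then (st.1 ++ [current], [pr.2]) else (st.1, current))
    ([], [PySem.List.pyGetD path 0 ""])
  st.1 ++ [st.2 ++ [dest_ip]]

-- ===== PRECONDITION & SPEC =====
-- Pre_ excludes exactly the empty path, on which both Pythons raise IndexError at path[0].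
def Pre_extract_transition_segments (path : List String) (region_map : List (String × List String)) (dest_ip : String) : Prop := path ≠ []
instance (path : List String) (region_map : List (String × List String)) (dest_ip : String) : Decidable (Pre_extract_transition_segments path region_map dest_ip) := by unfold Pre_extract_transition_segments; infer_instance

def pvWitness_extract_transition_segments : List String × (List (String × List String)) × String :=
  (["10.0.0.1", "10.0.0.2", "10.1.0.1"], [("R1", ["10.0.0.1", "10.0.0.2"]), ("R2", ["10.1.0.1"])], "10.1.0.9")

def Spec_extract_transition_segments (path : List String) (region_map : List (String × List String)) (dest_ip : String) (out : List (List String)) : Prop := out = extract_transition_segments_alt path region_map dest_ip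
instance (path : List String) (region_map : List (String × List String)) (dest_ip : String) (out : List (List String)) : Decidable (Spec_extract_transition_segments path region_map dest_ip out) := by unfold Spec_extract_transition_segments; infer_instance

-- ===== CLAIM (what is proved, stated in full; the proofs are below) =====
def Claim_equal_extract_transition_segments : Prop := ∀ (path : List String) (region_map : List (String × List String)) (dest_ip : String), Dom_extract_transition_segments path region_map dest_ip → Pre_extract_transition_segments path region_map dest_ip → Spec_extract_transition_segments path region_map dest_ip (extract_transition_segments path region_map dest_ip)

-- ===== LEMMAS AND PROOFS =====

-- Loop body of A's range-loop (after zeta/beta reduction of the port; rg abstracts dict lookup with default).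
def pvFA (rg : String → String) (p : List String) (st : List (List String) × String × Int) (i : Int) : List (List String) × String × Int :=
  if rg (PySem.List.pyGetD p i "") ≠ st.2.1 then
    (st.1 ++ [PySem.List.slice p (some st.2.2) (some (i + 1))], rg (PySem.List.pyGetD p i ""), i)
  else st

-- A's post-loop finalisation.
def pvFinA (dest : String) (p : List String) (st : List (List String) × String × Int) : List (List String) :=
  let ls := PySem.List.slice p (some st.2.2) none
  if ls ≠ [] then st.1 ++ [ls ++ [dest]] else st.1

-- Loop body of B's pairwise pass.
def pvFB (rg : String → String) (st : List (List String) × List String) (pr : String × String) : List (List String) × List String :=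
  if rg pr.2 ≠ rg pr.1 then (st.1 ++ [st.2 ++ [pr.2]], [pr.2]) else (st.1, st.2 ++ [pr.2])

def pvRg (region_map : List (String × List String)) : String → String :=
  fun s => (region_map.foldl (fun d rn => rn.2.foldl (fun d node => d.insert node rn.1) d) (PySem.Dict.empty : PySem.Dict String String)).getD s "未知区域"

lemma pv_bridgeA (path : List String) (region_map : List (String × List String)) (dest_ip : String) :
    extract_transition_segments path region_map dest_ip
      = pvFinA dest_ip path ((PySem.List.pyRange 1 (path.length : Int) 1).foldl (pvFA (pvRg region_map) path)
          ([], pvRg region_map (PySem.List.pyGetD path 0 ""), 0)) := rfl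

-- B's final append.
def pvFinB (dest : String) (st : List (List String) × List String) : List (List String) :=
  st.1 ++ [st.2 ++ [dest]]

lemma pv_bridgeB (path : List String) (region_map : List (String × List String)) (dest_ip : String) :
    extract_transition_segments_alt path region_map dest_ip
      = pvFinB dest_ip ((path.zip (PySem.List.slice path (some 1) none)).foldl (pvFB (pvRg region_map))
          ([], [PySem.List.pyGetD path 0 ""])) := rfl

-- Growing the current segment by one node extends the slice by one.
lemma pv_take_push (p : List String) (start i : Nat) (hs : start ≤ i) (hi : i < p.length) :
    (p.drop start).take (i - start) ++ [p[i]] = (p.drop start).take (i + 1 - start) := by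
  have h1 : i + 1 - start = (i - start) + 1 := by omega
  have h2 : (p.drop start)[i - start]? = some p[i] := by
    rw [List.getElem?_drop]
    have h3 : start + (i - start) = i := by omega
    rw [h3, List.getElem?_eq_getElem hi]
  rw [h1, List.take_add_one, h2]
  rfl

-- Main invariant: from iteration i (1 <= i <= n, segment start 'start' < i, current region = region of path[i-1],
-- B's current segment = path[start:i]), A's remaining loop + finalisation equals B's remaining pairwise pass + final append.
lemma pv_main (rg : String → String) (dest : String) (p : List String) :
    ∀ (m i start : Nat) (segs : List (List String)), i + m = p.length → 1 ≤ i → start < i →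
      pvFinA dest p ((PySem.List.pyRange (i : Int) (p.length : Int) 1).foldl (pvFA rg p)
          (segs, rg (p.getD (i - 1) ""), (start : Int)))
        = pvFinB dest (((p.drop (i - 1)).zip (p.drop i)).foldl (pvFB rg)
            (segs, (p.drop start).take (i - start))) := by
  intro m
  induction m with
  | zero =>
    intro i start segs h hi hs
    have hin : i = p.length := by omega
    rw [PySem.List.pyRange_one_eq_nil (by exact_mod_cast hin.ge)]
    have hdrop : p.drop i = [] := by rw [hin, List.drop_length]
    rw [hdrop, List.zip_nil_right]
    simp only [List.foldl_nil]
    unfold pvFinA pvFinB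
    rw [PySem.List.slice_from_natCast]
    have hne : p.drop start ≠ [] := by rw [ne_eq, List.drop_eq_nil_iff]; omega
    rw [if_pos hne]
    have htk : (p.drop start).take (i - start) = p.drop start :=
      List.take_of_length_le (by rw [List.length_drop]; omega)
    rw [htk]
  | succ m ih =>
    intro i start segs h hi hs
    have hilt : i < p.length := by omega
    have hi1lt : i - 1 < p.length := by omega
    rw [PySem.List.pyRange_one_cons (by exact_mod_cast hilt), List.foldl_cons]
    have hd2 : p.drop i = p[i] :: p.drop (i + 1) := List.drop_eq_getElem_cons hilt
    have hd1 : p.drop (i - 1) = p[i - 1] :: p.drop i := by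
      have e := List.drop_eq_getElem_cons (l := p) hi1lt
      have h3 : i - 1 + 1 = i := by omega
      rw [h3] at e
      exact e
    rw [hd1, hd2, List.zip_cons_cons, List.foldl_cons]
    have hgi : p.getD i "" = p[i] := List.getD_eq_getElem p "" hilt
    have hgi1 : p.getD (i - 1) "" = p[i - 1] := List.getD_eq_getElem p "" hi1lt
    have hIH := ih (i + 1) 
    have hpush := pv_take_push p start i (by omega) hilt
    by_cases hc : rg p[i] = rg p[i - 1]
    · have hA : pvFA rg p (segs, rg (p.getD (i - 1) ""), (start : Int)) ((i : Nat) : Int)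
          = (segs, rg (p.getD (i - 1) ""), (start : Int)) := by
        unfold pvFA
        rw [if_neg (by simp only [PySem.List.pyGetD_natCast, hgi, hgi1, hc, ne_eq, not_true_eq_false, not_false_eq_true])]
      have hB : pvFB rg (segs, (p.drop start).take (i - start)) (p[i - 1], p[i])
          = (segs, (p.drop start).take (i + 1 - start)) := by
        unfold pvFB
        rw [if_neg (by simp only [hc, ne_eq, not_true_eq_false, not_false_eq_true])]
        simp only [hpush]
      have hcast : ((i : Int) + 1) = (((i + 1 : Nat) : Int)) := by push_cast; ring
      have hreg : rg (p.getD (i - 1) "") = rg (p.getD i "") := by rw [hgi, hgi1, hc]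
      rw [hA, hB, hcast, ← hd2, hreg]
      have hIH2 := hIH start segs (by omega) (by omega) (by omega)
      have hsub : i + 1 - 1 = i := by omega
      rw [hsub] at hIH2
      exact hIH2
    · have hcast : ((i : Int) + 1) = (((i + 1 : Nat) : Int)) := by push_cast; ring
      have hA : pvFA rg p (segs, rg (p.getD (i - 1) ""), (start : Int)) ((i : Nat) : Int)
          = (segs ++ [(p.drop start).take (i + 1 - start)], rg (p.getD i ""), ((i : Nat) : Int)) := by
        unfold pvFA
        rw [if_pos (by simp only [PySem.List.pyGetD_natCast, hgi, hgi1, ne_eq]; exact hc)]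
        rw [hcast, PySem.List.slice_natCast]
        simp only [PySem.List.pyGetD_natCast, hgi]
      have hB : pvFB rg (segs, (p.drop start).take (i - start)) (p[i - 1], p[i])
          = (segs ++ [(p.drop start).take (i + 1 - start)], [p[i]]) := by
        unfold pvFB
        rw [if_pos (by simpa using hc)]
        simp only [hpush]
      rw [hA, hB, hcast, ← hd2]
      have hIH2 := hIH i (segs ++ [(p.drop start).take (i + 1 - start)]) (by omega) (by omega) (by omega)
      have hsub : i + 1 - 1 = i := by omega
      rw [hsub] at hIH2
      have htk1 : (p.drop i).take (i + 1 - i) = [p[i]] := by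
        have h4 : i + 1 - i = 1 := by omega
        rw [h4, hd2]
        rfl
      rw [htk1] at hIH2
      exact hIH2

-- ===== VERDICT (by name: the statement is the Claim_ definition above) =====
theorem extract_transition_segments_spec : Claim_equal_extract_transition_segments := by
  intro path region_map dest_ip _ hpre
  unfold Spec_extract_transition_segments
  obtain ⟨x, t, rfl⟩ := List.exists_cons_of_ne_nil hpre
  rw [pv_bridgeA, pv_bridgeB]
  have hmain := pv_main (pvRg region_map) dest_ip (x :: t) t.length 1 0 []
    (by rw [List.length_cons, Nat.add_comm]) (le_refl 1) Nat.zero_lt_one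
  simp only [Nat.sub_self, Nat.sub_zero, List.drop_zero, List.drop_one, List.tail_cons,
    Nat.cast_one, Nat.cast_zero, List.getD_cons_zero] at hmain
  have htake : List.take 1 (x :: t) = [x] := rfl
  rw [htake] at hmain
  simp only [PySem.List.pyGetD_zero_cons, PySem.List.slice_from_one, List.tail_cons]
  exact hmain
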